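-- pv_equiv track=rewrite | github.com/wherby/code | algorithm/dp/questions/dpAndDFSWithCache/maximum-deletions-on-a-string.dp.py | deleteString
-- ===== SOURCE A (Python) =====
-- def deleteString(s: str) -> int:
--     n = len(s)
--     d = [0]*(n+1)
--     d[n] =0
--     d[n-1]=1
--     for i in range(n-2,-1,-1):
--         d[i] =1
--         for j in range(i+1,n,1):
--             leng = j -i
--             if j + leng > n :
--                 break
--             if s[i:j] ==s[j:j+leng]:
--                 d[i] = max(d[i],d[j] +1)
--     return d[0]
-- ===== SOURCE B (Python) =====
-- def deleteString(s: str) -> int: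
--     # LCP table built row by row replaces the slice comparisons of A.
--     n = len(s)
--     if n == 0:
--         return 0
--     dp = [0] * (n + 1)
--     lcp = [0] * (n + 1)  # lcp row for suffix index i+1
--     for i in range(n - 1, -1, -1):
--         row = [0] * (n + 1)
--         for j in range(n):
--             if s[i] == s[j]:
--                 row[j] = lcp[j + 1] + 1
--         best = 1
--         for j in range(i + 1, n):
--             if row[j] >= j - i:
--                 best = max(best, dp[j] + 1)
--         dp[i] = best
--         lcp = row
--     return dp[0]
-- ===== Notes on version B (the rewrite author's own statement) =====
-- stated objective: alternative
-- what changed: B precomputes an LCP table row by row so each prefix-equality test is a single table lookup, replacing A's slice comparisons inside the double loop; it performs O(n^2) elementary steps where A's slice comparisons make it O(n^3) in elementary operations, but A's slices run in C so B is not faster in a timing run.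
-- intended difference: On the empty string A returns 1 because d[n-1]=1 hits d[-1] and wraps around to d[0]; B returns 0, the intended value since no deletion is possible on an empty string. — e.g. on deleteString(""): A returns 1, B returns 0
import Mathlib
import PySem

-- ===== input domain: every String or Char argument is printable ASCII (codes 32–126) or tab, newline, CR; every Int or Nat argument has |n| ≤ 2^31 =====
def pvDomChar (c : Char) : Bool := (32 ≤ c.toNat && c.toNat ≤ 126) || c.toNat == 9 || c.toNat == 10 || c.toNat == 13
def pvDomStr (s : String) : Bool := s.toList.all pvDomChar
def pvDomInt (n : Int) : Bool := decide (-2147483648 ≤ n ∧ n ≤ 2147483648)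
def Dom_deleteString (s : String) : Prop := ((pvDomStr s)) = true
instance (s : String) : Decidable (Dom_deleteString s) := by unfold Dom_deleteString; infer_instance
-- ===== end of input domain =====

-- B replaces A's repeated slice comparisons by an LCP table built row by row (a different algorithm);
-- on the empty string A returns 1 (negative-index wraparound of d[n-1]), B returns the intended 0 (see D_ below).

-- ===== PORT A =====
-- inner loop: for j in range(i+1, n): leng = j-i; if j+leng > n: break; if s[i:j]==s[j:j+leng]: d[i] = max(d[i], d[j]+1)
def aInner (c : List Char) (n i : Nat) (d : List Int) (j : Nat) : List Int :=
  if _h : j < n then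
    if n < j + (j - i) then d  -- break  (leng = j - i)
    else
      aInner c n i
        (if PySem.List.slice c (some (i : Int)) (some (j : Int)) =
            PySem.List.slice c (some (j : Int)) (some ((j : Int) + ((j - i : Nat) : Int))) then
          d.set i (max (d.getD i 0) (d.getD j 0 + 1))
        else d) (j + 1)
  else d
termination_by n - j

-- outer loop: for i in range(n-2, -1, -1): d[i] = 1; <inner>   (argument k processes i = k-1, …, 0)
def aOuter (c : List Char) (n : Nat) (d : List Int) : Nat → List Int
  | 0 => d
  | k + 1 => aOuter c n (aInner c n k (d.set k 1) (k + 1)) k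

def deleteString (s : String) : Int :=
  let c := s.toList
  let n := c.length
  let d := List.replicate (n + 1) (0 : Int)
  let d := d.set n 0
  -- d[n-1] = 1 with Python indexing: for n = 0 the index -1 wraps to the last cell, i.e. (n-1) mod (n+1)
  let d := d.set (((n : Int) - 1).emod ((n : Int) + 1)).toNat 1
  let d := aOuter c n d (n - 1)
  d.getD 0 0

-- ===== PORT B =====
-- one outer step: build lcp row i from row i+1, then dp[i] = max(1, max dp[j]+1 over j with row[j] >= j-i)
def bOuter (c : List Char) (n : Nat) (dp lcp : List Int) : Nat → List Int
  | 0 => dp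
  | k + 1 =>
    let row := (List.range (n + 1)).map
      (fun j => if j < n ∧ c.getD k ' ' = c.getD j ' ' then lcp.getD (j + 1) 0 + 1 else 0)
    let best := (List.range' (k + 1) (n - (k + 1))).foldl
      (fun b (j : Nat) => if (j : Int) - (k : Int) ≤ row.getD j 0 then max b (dp.getD j 0 + 1) else b) 1
    bOuter c n (dp.set k best) row k

def deleteString_alt (s : String) : Int :=
  let c := s.toList
  let n := c.length
  if n = 0 then 0
  else (bOuter c n (List.replicate (n + 1) 0) (List.replicate (n + 1) 0) n).getD 0 0

-- ===== PRECONDITION & SPEC =====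
-- On the empty string A returns 1 because d[n-1] = d[-1] wraps around to d[0]; B returns 0,
-- the intended value: no deletion can be performed on an empty string.
def D_deleteString (s : String) : Prop := s = ""
instance (s : String) : Decidable (D_deleteString s) := by unfold D_deleteString; infer_instance

def Spec_deleteString (s : String) (out : Int) : Prop := ¬ D_deleteString s → out = deleteString_alt s
instance (s : String) (out : Int) : Decidable (Spec_deleteString s out) := by unfold Spec_deleteString; infer_instance

def pvDiffWitness_deleteString : String := ""
def pvDiffWitnessOut_deleteString : Int × Int := (1, 0)

-- ===== CLAIM (what is proved, stated in full; the proofs are below) =====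
def Claim_unchanged_deleteString : Prop := ∀ (s : String), Dom_deleteString s → Spec_deleteString s (deleteString s)
def Claim_changed_deleteString : Prop := Dom_deleteString (pvDiffWitness_deleteString) ∧ D_deleteString (pvDiffWitness_deleteString) ∧ deleteString (pvDiffWitness_deleteString) = pvDiffWitnessOut_deleteString.1 ∧ deleteString_alt (pvDiffWitness_deleteString) = pvDiffWitnessOut_deleteString.2 ∧ pvDiffWitnessOut_deleteString.1 ≠ pvDiffWitnessOut_deleteString.2
def Claim_exact_deleteString : Prop := ∀ (s : String), Dom_deleteString s → D_deleteString s → deleteString s ≠ deleteString_alt s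

-- ===== LEMMAS AND PROOFS =====

-- length of the longest common prefix of two lists
def lcpLen : List Char → List Char → Nat
  | a :: as, b :: bs => if a = b then lcpLen as bs + 1 else 0
  | _, _ => 0

-- the common mathematical value both DPs compute for suffix index i
def specD (c : List Char) (i : Nat) : Int :=
  if _h : i < c.length then
    ((List.range' (i + 1) (c.length - (i + 1))).attach).foldl
      (fun b jh => if jh.1 - i ≤ lcpLen (c.drop i) (c.drop jh.1) then max b (specD c jh.1 + 1) else b) 1
  else 0
termination_by c.length - i
decreasing_by
  have := List.mem_range'_1.mp jh.2
  omega

theorem lcpLen_nil_right (a : List Char) : lcpLen a [] = 0 := by cases a <;> rfl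

theorem lcpLen_le_right (a b : List Char) : lcpLen a b ≤ b.length := by
  induction a generalizing b with
  | nil => cases b <;> simp [lcpLen]
  | cons x as ih =>
    cases b with
    | nil => simp [lcpLen]
    | cons y bs =>
      simp only [lcpLen, List.length_cons]
      split_ifs
      · have := ih bs; omega
      · omega

theorem lcpLen_nil_left (b : List Char) : lcpLen [] b = 0 := by cases b <;> rfl

theorem getD_set_self (d : List Int) (i : Nat) (v : Int) (h : i < d.length) :
    (d.set i v).getD i 0 = v := by
  simp [List.getD, List.getElem?_set, h]

theorem getD_set_ne (d : List Int) (i m : Nat) (v : Int) (h : m ≠ i) :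
    (d.set i v).getD m 0 = d.getD m 0 := by
  simp [List.getD, List.getElem?_set, Ne.symm h]

theorem getD_map_range' (f : Nat → Int) (n j : Nat) (h : j < n) :
    ((List.range n).map f).getD j 0 = f j := by
  simp [List.getD, List.getElem?_map, List.getElem?_range, h]

theorem getD_replicate_zero (m j : Nat) : (List.replicate m (0:Int)).getD j 0 = 0 := by
  simp only [List.getD, List.getElem?_replicate]
  split <;> rfl

theorem take_eq_iff (a b : List Char) (L : Nat) (ha : L ≤ a.length) (hb : L ≤ b.length) :
    a.take L = b.take L ↔ L ≤ lcpLen a b := by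
  induction a generalizing b L with
  | nil =>
    have : L = 0 := by simpa using ha
    subst this; simp
  | cons x as ih =>
    cases b with
    | nil =>
      have : L = 0 := by simpa using hb
      subst this; simp
    | cons y bs =>
      cases L with
      | zero => simp
      | succ L =>
        simp only [List.take_succ_cons, lcpLen, List.cons.injEq]
        by_cases hxy : x = y
        · subst hxy
          have h2 := ih bs L (by simpa using ha) (by simpa using hb)
          simp only [eq_self_iff_true, if_true, true_and, h2]
          omega
        · simp [hxy]

theorem lcp_drop (c : List Char) (i j : Nat) (hi : i < c.length) (hj : j < c.length) :
    lcpLen (c.drop i) (c.drop j) =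
      if c.getD i ' ' = c.getD j ' ' then lcpLen (c.drop (i + 1)) (c.drop (j + 1)) + 1 else 0 := by
  rw [List.drop_eq_getElem_cons hi, List.drop_eq_getElem_cons hj,
      List.getD_eq_getElem c ' ' hi, List.getD_eq_getElem c ' ' hj]
  rfl

theorem foldl_id {α β : Type} (l : List α) (f : β → α → β) (b : β)
    (h : ∀ x ∈ l, ∀ acc, f acc x = acc) : l.foldl f b = b := by
  induction l generalizing b with
  | nil => rfl
  | cons x xs ih =>
    simp only [List.foldl_cons]
    rw [h x (by simp) b]
    exact ih _ (fun y hy acc => h y (by simp [hy]) acc)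

theorem foldl_congr' {α β : Type} (l : List α) (f g : β → α → β) (b : β)
    (h : ∀ x ∈ l, ∀ acc, f acc x = g acc x) : l.foldl f b = l.foldl g b := by
  induction l generalizing b with
  | nil => rfl
  | cons x xs ih =>
    simp only [List.foldl_cons]
    rw [h x (by simp) b]
    exact ih _ (fun y hy acc => h y (by simp [hy]) acc)

theorem set_self (d : List Int) (i : Nat) (hi : i < d.length) : d.set i (d.getD i 0) = d := by
  rw [List.getD_eq_getElem d 0 hi]
  exact List.set_getElem_self hi

theorem aInner_eq (c : List Char) (i : Nat) (hi : i < c.length) :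
    ∀ j d, i < j → d.length = c.length + 1 →
      aInner c c.length i d j =
        d.set i ((List.range' j (c.length - j)).foldl
          (fun b jj => if jj - i ≤ lcpLen (c.drop i) (c.drop jj) then max b (d.getD jj 0 + 1) else b)
          (d.getD i 0)) := by
  suffices H : ∀ m j d, c.length - j ≤ m → i < j → d.length = c.length + 1 →
      aInner c c.length i d j =
        d.set i ((List.range' j (c.length - j)).foldl
          (fun b jj => if jj - i ≤ lcpLen (c.drop i) (c.drop jj) then max b (d.getD jj 0 + 1) else b)
          (d.getD i 0)) by
    exact fun j d h1 h2 => H c.length j d (by omega) h1 h2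
  intro m
  induction m with
  | zero =>
    intro j d hm hij hd
    have hjn : ¬ j < c.length := by omega
    rw [aInner, dif_neg hjn]
    have h0 : c.length - j = 0 := by omega
    rw [h0, List.range'_zero, List.foldl_nil]
    exact (set_self d i (by omega)).symm
  | succ m ih =>
    intro j d hm hij hd
    by_cases hjn : j < c.length
    case neg => exact ih j d (by omega) hij hd
    case pos =>
    rw [aInner, dif_pos hjn]
    have hr : c.length - j = (c.length - (j + 1)) + 1 := by omega
    by_cases hbr : c.length < j + (j - i)
    · rw [if_pos hbr]
      have hid : ∀ jj ∈ List.range' j (c.length - j), ∀ acc,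
          (if jj - i ≤ lcpLen (c.drop i) (c.drop jj) then max acc (d.getD jj 0 + 1) else acc) = acc := by
        intro jj hjj acc
        have hmem := List.mem_range'_1.mp hjj
        have hlcp := lcpLen_le_right (c.drop i) (c.drop jj)
        rw [List.length_drop] at hlcp
        rw [if_neg (by omega)]
      rw [foldl_id _ _ _ hid]
      exact (set_self d i (by omega)).symm
    · rw [if_neg hbr]
      have hslice : (PySem.List.slice c (some (i : Int)) (some (j : Int)) =
          PySem.List.slice c (some (j : Int)) (some ((j : Int) + ((j - i : Nat) : Int)))) ↔
          (j - i ≤ lcpLen (c.drop i) (c.drop j)) := by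
        rw [PySem.List.slice_natCast, PySem.List.slice_natCast_add]
        exact take_eq_iff _ _ _ (by rw [List.length_drop]; omega) (by rw [List.length_drop]; omega)
      by_cases hc : j - i ≤ lcpLen (c.drop i) (c.drop j)
      · rw [if_pos (hslice.mpr hc)]
        rw [ih (j + 1) (d.set i (max (d.getD i 0) (d.getD j 0 + 1))) (by omega) (by omega)
            (by rw [List.length_set]; exact hd)]
        rw [hr, List.range'_succ, List.foldl_cons]
        rw [if_pos hc]
        rw [getD_set_self d i _ (by omega)]
        rw [foldl_congr' _ _
            (fun acc jj => if jj - i ≤ lcpLen (c.drop i) (c.drop jj) then max acc (d.getD jj 0 + 1) else acc) _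
            (by
              intro jj hjj acc
              have hmem := List.mem_range'_1.mp hjj
              rw [getD_set_ne d i jj _ (by omega)])]
        rw [List.set_set]
      · rw [if_neg (fun hcc => hc (hslice.mp hcc))]
        rw [ih (j + 1) d (by omega) (by omega) hd]
        rw [hr, List.range'_succ, List.foldl_cons, if_neg hc]

theorem specD_unfold (c : List Char) (i : Nat) (hi : i < c.length) :
    specD c i = (List.range' (i + 1) (c.length - (i + 1))).foldl
      (fun b jj => if jj - i ≤ lcpLen (c.drop i) (c.drop jj) then max b (specD c jj + 1) else b) 1 := by
  conv_lhs => rw [specD]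
  rw [dif_pos hi]
  exact List.foldl_attach
    (f := fun b jj => if jj - i ≤ lcpLen (c.drop i) (c.drop jj) then max b (specD c jj + 1) else b)

theorem aOuter_inv (c : List Char) :
    ∀ k d, k ≤ c.length → d.length = c.length + 1 →
      (∀ j, k ≤ j → j ≤ c.length → d.getD j 0 = specD c j) →
      ∀ j, j ≤ c.length → (aOuter c c.length d k).getD j 0 = specD c j := by
  intro k
  induction k with
  | zero =>
    intro d _ _ hinv j hj
    exact hinv j (Nat.zero_le j) hj
  | succ k ih =>
    intro d hk hd hinv j hj
    have hik : k < c.length := by omega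
    rw [aOuter]
    rw [aInner_eq c k hik (k + 1) (d.set k 1) (by omega) (by rw [List.length_set]; exact hd)]
    rw [getD_set_self d k 1 (by omega)]
    rw [foldl_congr' _ _
        (fun b jj => if jj - k ≤ lcpLen (c.drop k) (c.drop jj) then max b (specD c jj + 1) else b) _
        (by
          intro jj hjj acc
          have hmem := List.mem_range'_1.mp hjj
          rw [getD_set_ne d k jj 1 (by omega), hinv jj (by omega) (by omega)])]
    rw [← specD_unfold c k hik, List.set_set]
    refine ih (d.set k (specD c k)) (by omega) (by rw [List.length_set]; exact hd) ?_ j hj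
    intro j2 hj2 hj2'
    by_cases he : j2 = k
    · subst he; exact getD_set_self d j2 _ (by omega)
    · rw [getD_set_ne d k j2 _ he]; exact hinv j2 (by omega) hj2'

theorem bOuter_inv (c : List Char) :
    ∀ k dp lcp, k ≤ c.length → dp.length = c.length + 1 →
      (∀ j, k ≤ j → j ≤ c.length → dp.getD j 0 = specD c j) →
      (∀ j, j ≤ c.length → lcp.getD j 0 = (lcpLen (c.drop k) (c.drop j) : Int)) →
      ∀ j, j ≤ c.length → (bOuter c c.length dp lcp k).getD j 0 = specD c j := by
  intro k
  induction k with
  | zero =>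
    intro dp lcp _ _ hdp _ j hj
    exact hdp j (Nat.zero_le j) hj
  | succ k ih =>
    intro dp lcp hk hdp hinv hlcp j hj
    have hkn : k < c.length := by omega
    simp only [bOuter]
    have hrow : ∀ j2, j2 ≤ c.length →
        ((List.range (c.length + 1)).map
          (fun j => if j < c.length ∧ c.getD k ' ' = c.getD j ' ' then lcp.getD (j + 1) 0 + 1 else 0)).getD j2 0 =
        (lcpLen (c.drop k) (c.drop j2) : Int) := by
      intro j2 hj2
      have hj2' : j2 < c.length + 1 := by omega
      rw [getD_map_range' _ _ _ hj2']
      by_cases hlt : j2 < c.length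
      · rw [lcp_drop c k j2 hkn hlt]
        by_cases hch : c.getD k ' ' = c.getD j2 ' '
        · rw [if_pos ⟨hlt, hch⟩, if_pos hch, hlcp (j2 + 1) (by omega)]
          push_cast
          ring
        · rw [if_neg (by tauto), if_neg hch]
          rfl
      · have hj2n : j2 = c.length := by omega
        subst hj2n
        rw [if_neg (by tauto), List.drop_length, lcpLen_nil_right]
        rfl
    rw [foldl_congr' _ _
        (fun b (jj : Nat) => if jj - k ≤ lcpLen (c.drop k) (c.drop jj) then max b (specD c jj + 1) else b) _
        (by
          intro jj hjj acc
          have hmem := List.mem_range'_1.mp hjj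
          beta_reduce
          rw [hrow jj (by omega)]
          by_cases hcnd : jj - k ≤ lcpLen (c.drop k) (c.drop jj)
          · rw [if_pos (by omega), if_pos hcnd, hinv jj (by omega) (by omega)]
          · rw [if_neg (by omega), if_neg hcnd])]
    rw [← specD_unfold c k hkn]
    refine ih (dp.set k (specD c k)) _ (by omega) (by rw [List.length_set]; exact hdp) ?_ hrow j hj
    intro j2 hj2 hj2'
    by_cases he : j2 = k
    · subst he; exact getD_set_self dp j2 _ (by omega)
    · rw [getD_set_ne dp k j2 _ he]; exact hinv j2 (by omega) hj2'

theorem a_eq_spec (s : String) (h : s ≠ "") : deleteString s = specD s.toList 0 := by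
  have hc : s.toList ≠ [] := fun hh => h (String.toList_eq_nil_iff.mp hh)
  have hn : 1 ≤ s.toList.length := by
    cases hcl : s.toList with
    | nil => exact absurd hcl hc
    | cons x xs => simp [hcl]  -- length of cons is positive
  simp only [deleteString]
  have hm : ((((s.toList.length : Int) - 1).emod ((s.toList.length : Int) + 1)).toNat) =
      s.toList.length - 1 := by
    rw [show ((s.toList.length : Int) - 1).emod ((s.toList.length : Int) + 1) =
        ((s.toList.length : Int) - 1) % ((s.toList.length : Int) + 1) from rfl,
      Int.emod_eq_of_lt (by omega) (by omega)]
    omega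
  rw [hm]
  refine aOuter_inv s.toList (s.toList.length - 1) _ (by omega) (by simp) ?_ 0 (by omega)
  intro j hj hj'
  by_cases hjl : j = s.toList.length
  · subst hjl
    rw [getD_set_ne _ _ _ _ (by omega), getD_set_self _ _ _ (by simp)]
    rw [specD, dif_neg (by omega : ¬ s.toList.length < s.toList.length)]
  · have hjl2 : j = s.toList.length - 1 := by omega
    subst hjl2
    rw [getD_set_self _ _ _ (by simp)]
    rw [specD_unfold s.toList _ (by omega)]
    have h0 : s.toList.length - (s.toList.length - 1 + 1) = 0 := by omega
    rw [h0, List.range'_zero, List.foldl_nil]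

theorem b_eq_spec (s : String) (h : s ≠ "") : deleteString_alt s = specD s.toList 0 := by
  have hc : s.toList ≠ [] := fun hh => h (String.toList_eq_nil_iff.mp hh)
  have hn : 1 ≤ s.toList.length := by
    cases hcl : s.toList with
    | nil => exact absurd hcl hc
    | cons x xs => simp [hcl]  -- length of cons is positive
  simp only [deleteString_alt]
  rw [if_neg (by omega : ¬ s.toList.length = 0)]
  refine bOuter_inv s.toList s.toList.length _ _ (le_refl _) (by simp) ?_ ?_ 0 (by omega)
  · intro j hj hj'
    have hjl : j = s.toList.length := by omega
    subst hjl
    rw [getD_replicate_zero, specD, dif_neg (by omega : ¬ s.toList.length < s.toList.length)]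
  · intro j hj
    rw [getD_replicate_zero, List.drop_length, lcpLen_nil_left]
    rfl

-- ===== VERDICT (by name: the statement is the Claim_ definition above) =====
theorem deleteString_spec : Claim_unchanged_deleteString := by
  intro s _ hD
  have hne : s ≠ "" := hD
  rw [a_eq_spec s hne, b_eq_spec s hne]

theorem deleteString_changed : Claim_changed_deleteString := by
  unfold Claim_changed_deleteString; decide

theorem deleteString_tight : Claim_exact_deleteString := by
  intro s _ hD
  subst hD
  decide
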